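-- pv_equiv track=rewrite | github.com/vvrmatos/codewars | python/7kyu/all_nines.py | all_nines
-- ===== SOURCE A (Python) =====
-- def all_nines(x: int):
--     """This function goal is to take a non-even number
--     and find the first multiplier number that turns that x number
--     into a all nines number, e.g all_nines(11) -> 9, because 11 * 9.
--     Whereas, all_nines(13) -> 76923, because 13 * 76923 = 999999, and
--     no smaller positive integer, when multiplied by 13, generates an integer
--     that contains only 9's.
--     : x is a number parameter that x <= 4000
--     """
--
--     if x % 2 == 0:
--         return -1
--
--     numb = 1
--
--     while True:
--         result = str(x * numb)
--         result = set(result)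
--         if len(result) == 1 and result.pop() == '9':
--             return numb
--
--         numb += 1
-- ===== SOURCE B (Python) =====
-- def all_nines(x: int):
--     if x % 2 == 0:
--         return -1
--     k = 1
--     while True:
--         nines = 10 ** k - 1
--         if nines % x == 0:
--             return nines // x
--         k += 1
-- ===== Notes on version B (the rewrite author's own statement) =====
-- stated objective: alternative
-- what changed: Instead of counting the multiplier up one by one and inspecting the decimal string of each product, B iterates over the digit count k and tests divisibility of the all-nines number 10^k-1 by x, returning (10^k-1)//x at the first hit.
import Mathlib
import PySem

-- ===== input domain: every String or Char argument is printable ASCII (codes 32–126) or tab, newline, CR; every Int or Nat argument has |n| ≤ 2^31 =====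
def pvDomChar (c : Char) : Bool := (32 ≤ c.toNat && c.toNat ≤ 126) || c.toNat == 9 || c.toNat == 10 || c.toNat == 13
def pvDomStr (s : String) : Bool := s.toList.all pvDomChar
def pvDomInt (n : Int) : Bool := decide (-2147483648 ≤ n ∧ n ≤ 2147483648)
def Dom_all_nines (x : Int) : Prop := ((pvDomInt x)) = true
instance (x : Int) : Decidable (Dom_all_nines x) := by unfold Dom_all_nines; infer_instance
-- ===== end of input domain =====

-- B replaces A's unit-step search over multipliers (string-testing every product) by a search
-- over the digit count k, testing divisibility of 10^k-1 by x: an alternative arithmetic algorithm.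


-- ===== PORT A =====
-- Python's `while True` loop ported with fuel; 10 ^ x.toNat steps are proved sufficient on Pre_
-- (the answer numb is < 10 ^ x.toNat there), so the guard only makes the same computation total.
-- `result.pop()` on a set known to have exactly one element is that element: ported as `headD`.
def allNinesLoopA (x : Int) : Nat → Int → Int
  | 0, _ => 0  -- fuel exhausted: unreachable under Pre_
  | f + 1, numb =>
    let result := PySem.Int.toStr (x * numb)
    let resultSet : PySem.Set Char := PySem.Set.ofList result.toList
    if resultSet.length = 1 ∧ resultSet.headD ' ' = '9' then numb
    else allNinesLoopA x f (numb + 1)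

def all_nines (x : Int) : Int :=
  if PySem.Int.mod x 2 = 0 then -1
  else allNinesLoopA x (10 ^ x.toNat) 1

-- ===== PORT B =====
-- B's `while True` loop over the digit count k, with fuel; x.toNat steps are proved sufficient
-- on Pre_ (the least k with x ∣ 10^k - 1 is ≤ x there).
def allNinesLoopB (x : Int) : Nat → Nat → Int
  | 0, _ => 0  -- fuel exhausted: unreachable under Pre_
  | f + 1, k =>
    let nines : Int := 10 ^ k - 1
    if PySem.Int.mod nines x = 0 then PySem.Int.floordiv nines x
    else allNinesLoopB x f (k + 1)

def all_nines_alt (x : Int) : Int :=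
  if PySem.Int.mod x 2 = 0 then -1
  else allNinesLoopB x x.toNat 1

-- ===== PRECONDITION & SPEC =====
-- Pre_ excludes exactly the inputs on which A never returns: odd x ≤ 0 and odd multiples of 5
-- (no multiple of such x is a string of nines, so A's `while True` loop diverges).
def Pre_all_nines (x : Int) : Prop :=
  PySem.Int.mod x 2 = 0 ∨ (0 < x ∧ PySem.Int.mod x 5 ≠ 0)
instance (x : Int) : Decidable (Pre_all_nines x) := by unfold Pre_all_nines; infer_instance

def pvWitness_all_nines : Int := 13

def Spec_all_nines (x : Int) (out : Int) : Prop := out = all_nines_alt x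
instance (x : Int) (out : Int) : Decidable (Spec_all_nines x out) := by unfold Spec_all_nines; infer_instance

-- ===== CLAIM (what is proved, stated in full; the proofs are below) =====
def Claim_equal_all_nines : Prop := ∀ (x : Int), Dom_all_nines x → Pre_all_nines x → Spec_all_nines x (all_nines x)

-- ===== LEMMAS AND PROOFS =====

-- x * n is a positive string of nines, i.e. 10^k - 1 for some k ≥ 1
def NineProd (x n : Int) : Prop := ∃ k : Nat, 0 < k ∧ x * n = 10 ^ k - 1

lemma digitChar_eq_nine {d : Nat} (hd : d < 10) : d.digitChar = '9' ↔ d = 9 := by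
  interval_cases d <;> simp [Nat.digitChar]

lemma toDigitsCore_eq (f : Nat) : ∀ (n : Nat) (l : List Char), 0 < n → n < f →
    Nat.toDigitsCore 10 f n l = ((Nat.digits 10 n).map Nat.digitChar).reverse ++ l := by
  induction f with
  | zero => intro n l hn hf; omega
  | succ f ih =>
    intro n l hn hf
    rw [Nat.toDigitsCore]
    rw [Nat.digits_def' (by norm_num : 1 < 10) hn]
    by_cases h : n / 10 = 0
    · simp only [h, if_pos]
      simp
    · rw [if_neg h]
      rw [ih (n / 10) _ (by omega) (by omega)]
      simp

lemma toChars_pos (m : Int) (hm : 0 < m) :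
    PySem.Int.toChars m = ((Nat.digits 10 m.toNat).map Nat.digitChar).reverse := by
  unfold PySem.Int.toChars
  rw [if_neg (by omega)]
  unfold Nat.toDigits
  rw [toDigitsCore_eq (m.toNat + 1) m.toNat [] (by omega) (by omega)]
  simp

lemma digits_replicate_nine (k : Nat) : Nat.digits 10 (10 ^ k - 1) = List.replicate k 9 := by
  induction k with
  | zero => simp
  | succ k ih =>
    have ht : 1 ≤ 10 ^ k := Nat.one_le_pow _ _ (by norm_num)
    have hpow : 10 ^ (k + 1) = 10 * 10 ^ k := by ring
    rw [Nat.digits_def' (by norm_num : 1 < 10) (by omega)]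
    have h1 : (10 ^ (k + 1) - 1) % 10 = 9 := by omega
    have h2 : (10 ^ (k + 1) - 1) / 10 = 10 ^ k - 1 := by omega
    rw [h1, h2, ih, List.replicate_succ]

lemma ofDigits_replicate_nine (k : Nat) : Nat.ofDigits 10 (List.replicate k 9) = 10 ^ k - 1 := by
  induction k with
  | zero => simp
  | succ k ih =>
    have ht : 1 ≤ 10 ^ k := Nat.one_le_pow _ _ (by norm_num)
    rw [List.replicate_succ, Nat.ofDigits_cons, ih]
    omega

lemma set_char_singleton_iff (s : List Char) :
    (s.length = 1 ∧ s.headD ' ' = '9') ↔ s = ['9'] := by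
  rcases s with _ | ⟨c, _ | ⟨d, t⟩⟩ <;> simp

lemma foldl_add_nines (cs : List Char) (h : ∀ c ∈ cs, c = '9') :
    List.foldl PySem.Set.add ['9'] cs = ['9'] := by
  induction cs with
  | nil => rfl
  | cons c t ih =>
    have hc : c = '9' := h c (by simp)
    have ht : ∀ c ∈ t, c = '9' := fun c hc' => h c (by simp [hc'])
    simp [hc, PySem.Set.add, ih ht]

lemma ofList_eq_nine_iff (cs : List Char) :
    PySem.Set.ofList cs = ['9'] ↔ cs ≠ [] ∧ ∀ c ∈ cs, c = '9' := by
  constructor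
  · intro h
    constructor
    · intro hnil; rw [hnil] at h; simp [PySem.Set.ofList, PySem.Set.empty] at h
    · intro c hc
      have : c ∈ PySem.Set.ofList cs := (PySem.Set.mem_ofList cs c).mpr hc
      rw [h] at this; simpa using this
  · rintro ⟨hne, hall⟩
    rcases cs with _ | ⟨c, t⟩
    · exact absurd rfl hne
    · have hc : c = '9' := hall c (by simp)
      have ht : ∀ c ∈ t, c = '9' := fun c hc' => hall c (by simp [hc'])
      show List.foldl PySem.Set.add PySem.Set.empty (c :: t) = ['9']
      rw [List.foldl_cons]
      have : PySem.Set.add PySem.Set.empty c = ['9'] := by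
        simp [PySem.Set.add, PySem.Set.empty, hc]
      rw [this]
      exact foldl_add_nines t ht

lemma nine_chars_iff (m : Int) (hm : 0 < m) :
    ((PySem.Set.ofList (PySem.Int.toStr m).toList).length = 1 ∧
      (PySem.Set.ofList (PySem.Int.toStr m).toList).headD ' ' = '9')
    ↔ ∃ k : Nat, 0 < k ∧ m = 10 ^ k - 1 := by
  rw [set_char_singleton_iff, PySem.Int.toList_toStr, toChars_pos m hm, ofList_eq_nine_iff]
  have hds : ∀ d ∈ Nat.digits 10 m.toNat, d < 10 := fun d hd =>
    Nat.digits_lt_base (by norm_num) hd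
  constructor
  · rintro ⟨hne, hall⟩
    have hall' : ∀ d ∈ Nat.digits 10 m.toNat, d = 9 := by
      intro d hd
      have : Nat.digitChar d = '9' := hall _ (by simp; exact ⟨d, hd, rfl⟩)
      exact (digitChar_eq_nine (hds d hd)).mp this
    have hrep : Nat.digits 10 m.toNat = List.replicate (Nat.digits 10 m.toNat).length 9 :=
      List.eq_replicate_of_mem hall'
    have hlen : 0 < (Nat.digits 10 m.toNat).length := by
      rcases h : Nat.digits 10 m.toNat with _ | _
      · rw [h] at hne; simp at hne
      · simp
    refine ⟨(Nat.digits 10 m.toNat).length, hlen, ?_⟩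
    have : m.toNat = 10 ^ (Nat.digits 10 m.toNat).length - 1 := by
      conv_lhs => rw [← Nat.ofDigits_digits 10 m.toNat, hrep]
      exact ofDigits_replicate_nine _
    have ht : 1 ≤ 10 ^ (Nat.digits 10 m.toNat).length := Nat.one_le_pow _ _ (by norm_num)
    have hcast : (((10:Nat) ^ (Nat.digits 10 m.toNat).length : Nat) : Int)
        = (10:Int) ^ (Nat.digits 10 m.toNat).length := by push_cast; ring
    omega
  · rintro ⟨k, hk, hmk⟩
    have ht : 1 ≤ 10 ^ k := Nat.one_le_pow _ _ (by norm_num)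
    have hmn : m.toNat = 10 ^ k - 1 := by
      have : (10:Int) ^ k = ((10 ^ k : Nat) : Int) := by push_cast; ring
      omega
    rw [hmn, digits_replicate_nine, List.map_replicate, List.reverse_replicate]
    constructor
    · simp
      omega
    · intro c hc
      exact List.eq_of_mem_replicate hc

lemma loopA_run (x N : Int) (hx : 0 < x) (_hN1 : 1 ≤ N) (hN : NineProd x N)
    (hmin : ∀ j : Int, 1 ≤ j → j < N → ¬ NineProd x j) :
    ∀ (f : Nat) (n : Int), 1 ≤ n → n ≤ N → (N - n).toNat < f → allNinesLoopA x f n = N := by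
  intro f
  induction f with
  | zero => intro n _ _ hf; omega
  | succ f ih =>
    intro n h1 h2 hf
    show (if (PySem.Set.ofList (PySem.Int.toStr (x * n)).toList).length = 1 ∧
          (PySem.Set.ofList (PySem.Int.toStr (x * n)).toList).headD ' ' = '9' then n
          else allNinesLoopA x f (n + 1)) = N
    have hpos : 0 < x * n := mul_pos hx (by omega)
    by_cases hp : NineProd x n
    · have hnN : n = N := by
        by_contra hne
        exact hmin n h1 (by omega) hp
      rw [if_pos ((nine_chars_iff (x * n) hpos).mpr hp), hnN]
    · rw [if_neg (fun hc => hp ((nine_chars_iff (x * n) hpos).mp hc))]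
      have hnN : n ≠ N := fun h => hp (h ▸ hN)
      exact ih (n + 1) (by omega) (by omega) (by omega)

lemma loopB_run (x : Int) (K : Nat) (_hx : 0 < x) (_hK1 : 1 ≤ K) (hK : x ∣ 10 ^ K - 1)
    (hmin : ∀ j : Nat, 1 ≤ j → j < K → ¬ x ∣ 10 ^ j - 1) :
    ∀ (f k : Nat), 1 ≤ k → k ≤ K → K - k < f →
      allNinesLoopB x f k = PySem.Int.floordiv (10 ^ K - 1) x := by
  intro f
  induction f with
  | zero => intro k _ _ hf; omega
  | succ f ih =>
    intro k h1 h2 hf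
    show (if PySem.Int.mod ((10:Int) ^ k - 1) x = 0 then PySem.Int.floordiv ((10:Int) ^ k - 1) x
          else allNinesLoopB x f (k + 1)) = PySem.Int.floordiv (10 ^ K - 1) x
    by_cases hd : x ∣ (10:Int) ^ k - 1
    · have hkK : k = K := by
        by_contra hne
        exact hmin k h1 (by omega) hd
      rw [if_pos ((PySem.Int.mod_eq_zero_iff_dvd _ _).mpr hd), hkK]
    · rw [if_neg (fun hc => hd ((PySem.Int.mod_eq_zero_iff_dvd _ _).mp hc))]
      have hkK : k ≠ K := fun h => hd (h ▸ hK)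
      exact ih (k + 1) (by omega) (by omega) (by omega)

-- ===== VERDICT (by name: the statement is the Claim_ definition above) =====
theorem all_nines_spec : Claim_equal_all_nines := by
  intro x _ hpre
  unfold Spec_all_nines all_nines all_nines_alt
  by_cases h2 : PySem.Int.mod x 2 = 0
  · rw [if_pos h2, if_pos h2]
  rw [if_neg h2, if_neg h2]
  have hpre' : 0 < x ∧ PySem.Int.mod x 5 ≠ 0 := hpre.resolve_left h2
  obtain ⟨hx, h5⟩ := hpre'
  set m : Nat := x.toNat with hm
  have hxm : x = (m : Int) := by omega
  have hm1 : 1 ≤ m := by omega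
  -- coprimality of 10 and m
  have hnd2 : ¬ (2 ∣ m) := by
    intro hd
    exact h2 ((PySem.Int.mod_eq_zero_iff_dvd x 2).mpr (by rw [hxm]; exact_mod_cast hd))
  have hnd5 : ¬ (5 ∣ m) := by
    intro hd
    exact h5 ((PySem.Int.mod_eq_zero_iff_dvd x 5).mpr (by rw [hxm]; exact_mod_cast hd))
  have hcop : Nat.Coprime 10 m := by
    have : Nat.Coprime (2 * 5) m :=
      Nat.Coprime.mul_left (Nat.Prime.coprime_iff_not_dvd Nat.prime_two |>.mpr hnd2)
        (Nat.Prime.coprime_iff_not_dvd (by norm_num) |>.mpr hnd5)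
    simpa using this
  -- existence of k ≥ 1 with m ∣ 10^k - 1, via Euler
  have hex : ∃ k : Nat, 0 < k ∧ m ∣ 10 ^ k - 1 := by
    refine ⟨Nat.totient m, Nat.totient_pos.mpr (by omega), ?_⟩
    have heu : 10 ^ Nat.totient m ≡ 1 [MOD m] := Nat.ModEq.pow_totient hcop
    exact (Nat.modEq_iff_dvd' (Nat.one_le_pow _ _ (by norm_num))).mp heu.symm
  obtain ⟨hK1, hKdvd⟩ := Nat.find_spec hex
  have hKle : Nat.find hex ≤ Nat.totient m := Nat.find_min' hex
    ⟨Nat.totient_pos.mpr (by omega), (Nat.modEq_iff_dvd' (Nat.one_le_pow _ _ (by norm_num))).mp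
      (Nat.ModEq.pow_totient hcop).symm⟩
  obtain ⟨K, hKdef⟩ : ∃ K, Nat.find hex = K := ⟨_, rfl⟩
  rw [hKdef] at hK1 hKdvd hKle
  have hKm : K ≤ m := le_trans hKle (Nat.totient_le m)
  have htK : 1 ≤ (10:Nat) ^ K := Nat.one_le_pow _ _ (by norm_num)
  -- the answer N
  obtain ⟨q, hq⟩ := hKdvd
  have hK10 : (10:Nat) ≤ 10 ^ K := by
    calc (10:Nat) = 10 ^ 1 := (pow_one 10).symm
    _ ≤ 10 ^ K := Nat.pow_le_pow_right (by norm_num) hK1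
  have hq1 : 1 ≤ q := by
    rcases Nat.eq_zero_or_pos q with h | h
    · subst h; rw [Nat.mul_zero] at hq; omega
    · exact h
  set N : Int := (q : Int) with hNdef
  have hxN : x * N = 10 ^ K - 1 := by
    rw [hxm, hNdef]
    calc (m : Int) * (q : Int) = ((m * q : Nat) : Int) := by push_cast; ring
    _ = (((10:Nat) ^ K - 1 : Nat) : Int) := by rw [← hq]
    _ = (10:Int) ^ K - 1 := by rw [Nat.cast_sub htK]; push_cast; ring
  have hN1 : 1 ≤ N := by rw [hNdef]; exact_mod_cast hq1
  have hKdvdI : x ∣ (10:Int) ^ K - 1 := ⟨N, hxN.symm⟩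
  have hminI : ∀ j : Nat, 1 ≤ j → j < K → ¬ x ∣ 10 ^ j - 1 := by
    intro j hj1 hjK hd
    refine Nat.find_min hex (by rw [hKdef]; exact hjK) ⟨hj1, ?_⟩
    have htj : 1 ≤ (10:Nat) ^ j := Nat.one_le_pow _ _ (by norm_num)
    obtain ⟨c, hc⟩ := hd
    have hc0 : 0 ≤ c := by
      have : 0 < (10:Int) ^ j - 1 := by
        have : (1:Int) < 10 ^ j := by
          calc (1:Int) < 10 ^ 1 := by norm_num
          _ ≤ 10 ^ j := by apply pow_le_pow_right₀ <;> omega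
        omega
      nlinarith [hxm ▸ hx]
    refine ⟨c.toNat, ?_⟩
    have : (((10:Nat) ^ j - 1 : Nat) : Int) = ((10:Int) ^ j - 1) := by
      rw [Nat.cast_sub htj]; push_cast; ring
    have : ((10 ^ j - 1 : Nat) : Int) = (m : Int) * (c.toNat : Int) := by
      rw [this, hc, hxm]; congr 1; omega
    exact_mod_cast this
  -- minimality of N among NineProd witnesses
  have hminN : ∀ j : Int, 1 ≤ j → j < N → ¬ NineProd x j := by
    rintro j hj1 hjN ⟨kk, hkk1, hkkeq⟩
    have hdvd : x ∣ (10:Int) ^ kk - 1 := ⟨j, hkkeq.symm⟩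
    have hkkK : K ≤ kk := by
      by_contra hlt
      exact hminI kk hkk1 (by omega) hdvd
    have hmono : (10:Int) ^ K ≤ 10 ^ kk := by
      apply pow_le_pow_right₀ <;> omega
    nlinarith
  have hNP : NineProd x N := ⟨K, hK1, hxN⟩
  -- run both loops
  have hA : allNinesLoopA x (10 ^ x.toNat) 1 = N := by
    apply loopA_run x N hx hN1 hNP hminN (10 ^ x.toNat) 1 le_rfl hN1
    have hNlt : N ≤ 10 ^ K - 1 := by nlinarith
    have : (10:Int) ^ K ≤ 10 ^ m := by
      apply pow_le_pow_right₀ <;> omega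
    have h10m : ((10:Nat) ^ m : Int) = (10:Int) ^ m := by push_cast; ring
    rw [← hm]
    omega
  have hB : allNinesLoopB x x.toNat 1 = PySem.Int.floordiv ((10:Int) ^ K - 1) x := by
    apply loopB_run x K hx hK1 hKdvdI hminI x.toNat 1 le_rfl hK1
    rw [← hm]
    omega
  rw [hA, hB]
  rw [PySem.Int.floordiv_eq_ediv_of_pos hx]
  rw [← hxN, hxm]
  rw [Int.mul_ediv_cancel_left _ (by omega : (m:Int) ≠ 0)]
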